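-- pv_equiv track=rewrite | github.com/hugoeidem/sorting-visualizer | utils.py | generate_subtree_colors
-- ===== SOURCE A (Python) =====
-- def dec_to_hex_str(n):
--     a, b = n//16, n%16
--     f = lambda x : "0123456789ABCDEF"[x]
--     return f(a) + f(b)
--
-- def generate_subtree_colors(n):
--     colors = []
--     span = 1
--     val = 255
--     while True:
--         colors.append("#" + dec_to_hex_str(val) * 3)
--         n -= span
--         span *= 2
--         val -= val // 6
--         if span > n:
--             break
--     return colors
-- ===== SOURCE B (Python) =====
-- def dec_to_hex_str(n):
--     a, b = n//16, n%16
--     f = lambda x : "0123456789ABCDEF"[x]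
--     return f(a) + f(b)
--
-- def generate_subtree_colors(n):
--     # closed-form level count: the original loop stops at the first j>=1 with 2**(j+1) > n+1
--     count = 1 if n < 3 else (n + 1).bit_length() - 1
--     colors = []
--     val = 255
--     for _ in range(count):
--         colors.append("#" + dec_to_hex_str(val) * 3)
--         val -= val // 6
--     return colors
-- ===== Notes on version B (the rewrite author's own statement) =====
-- stated objective: simpler
-- what changed: B replaces A's while-True span-doubling/remaining-n bookkeeping with a closed-form level count derived from the bit length of n+1 (with a guard for small and negative n) followed by a plain counted loop over the val recurrence.
import Mathlib
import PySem

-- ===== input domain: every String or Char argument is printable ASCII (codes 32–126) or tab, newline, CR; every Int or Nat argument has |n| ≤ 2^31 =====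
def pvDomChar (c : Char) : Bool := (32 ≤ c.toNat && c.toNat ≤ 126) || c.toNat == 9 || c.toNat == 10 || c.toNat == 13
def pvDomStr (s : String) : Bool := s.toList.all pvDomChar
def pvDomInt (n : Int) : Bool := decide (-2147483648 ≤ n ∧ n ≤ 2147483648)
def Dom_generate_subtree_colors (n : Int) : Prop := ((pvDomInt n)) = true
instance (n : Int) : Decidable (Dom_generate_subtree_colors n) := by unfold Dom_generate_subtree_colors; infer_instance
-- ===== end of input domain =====

-- B computes the number of color levels in closed form via bit_length instead of A's
-- span-doubling while-True loop; same return value, similar cost (objective: simpler).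

-- ===== PORT A =====
-- shared module helper dec_to_hex_str (n is always in [0,255] at every call site,
-- so the pyGetD default is never consulted)
def dec_to_hex_str (n : Int) : String :=
  let a := PySem.Int.floordiv n 16
  let b := PySem.Int.mod n 16
  String.ofList [PySem.List.pyGetD "0123456789ABCDEF".toList a ' ',
             PySem.List.pyGetD "0123456789ABCDEF".toList b ' ']

-- A's loop; span is carried as the exponent k (span = 2^k) so termination is provable
def loopA (colors : List String) (k : Nat) (val n : Int) : List String :=
  let s := dec_to_hex_str val
  let colors' := colors ++ ["#" ++ s ++ s ++ s]
  let n' := n - 2 ^ k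
  let val' := val - PySem.Int.floordiv val 6
  if (2 : Int) ^ (k + 1) > n' then colors'
  else loopA colors' (k + 1) val' n'
termination_by n.toNat
decreasing_by
  have h1 : (0:Int) < 2 ^ k := by positivity
  have h2 : (2:Int) ^ (k+1) = 2 * 2 ^ k := by ring
  simp_all only [not_lt, gt_iff_lt]
  omega

def generate_subtree_colors (n : Int) : List String := loopA [] 0 255 n

-- ===== PORT B =====
def buildB : Nat → Int → List String
  | 0, _ => []
  | count + 1, val =>
    let s := dec_to_hex_str val
    ("#" ++ s ++ s ++ s) :: buildB count (val - PySem.Int.floordiv val 6)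

def generate_subtree_colors_alt (n : Int) : List String :=
  let count := if n < 3 then 1 else PySem.Int.bitLength (n + 1) - 1
  buildB count 255

-- ===== PRECONDITION & SPEC =====
def Spec_generate_subtree_colors (n : Int) (out : List String) : Prop := out = generate_subtree_colors_alt n
instance (n : Int) (out : List String) : Decidable (Spec_generate_subtree_colors n out) := by unfold Spec_generate_subtree_colors; infer_instance

-- ===== CLAIM (what is proved, stated in full; the proofs are below) =====
def Claim_equal_generate_subtree_colors : Prop := ∀ (n : Int), Dom_generate_subtree_colors n → Spec_generate_subtree_colors n (generate_subtree_colors n)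

-- ===== LEMMAS AND PROOFS =====

-- number of iterations A's loop performs from exponent k, with m the invariant n + 2^k
def iterCount (k : Nat) (m : Int) : Nat :=
  if m < 2 ^ (k + 2) then 1 else iterCount (k + 1) m + 1
termination_by (m + 1 - 2 ^ (k + 2)).toNat
decreasing_by
  have h1 : (0:Int) < 2 ^ (k+2) := by positivity
  have h2 : (2:Int) ^ (k+3) = 2 * 2 ^ (k+2) := by ring
  simp_all only [not_lt]
  omega

theorem loopA_eq_buildB (colors : List String) (k : Nat) (val n : Int) :
    loopA colors k val n = colors ++ buildB (iterCount k (n + 2 ^ k)) val := by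
  fun_induction loopA colors k val n with
  | case1 colors k val n s colors' n' hbr =>
    have hlt : n + 2 ^ k < 2 ^ (k + 2) := by
      have h2 : (2:Int) ^ (k+1) = 2 * 2 ^ k := by ring
      have h3 : (2:Int) ^ (k+2) = 4 * 2 ^ k := by ring
      simp only [n', gt_iff_lt] at hbr
      omega
    unfold iterCount
    rw [if_pos hlt]
    simp [buildB, colors', s]
  | case2 colors k val n s colors' n' val' hbr ih =>

    have hge : ¬ n + 2 ^ k < 2 ^ (k + 2) := by
      have h2 : (2:Int) ^ (k+1) = 2 * 2 ^ k := by ring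
      have h3 : (2:Int) ^ (k+2) = 4 * 2 ^ k := by ring
      simp only [n', gt_iff_lt, not_lt] at hbr ⊢
      omega
    have hm : n' + 2 ^ (k + 1) = n + 2 ^ k := by
      have h2 : (2:Int) ^ (k+1) = 2 * 2 ^ k := by ring
      simp only [n']
      omega
    rw [ih, hm]
    conv_rhs => rw [iterCount]
    rw [if_neg hge]
    simp [buildB, colors', s, val']

theorem iterCount_bitLength (k : Nat) (m : Int) (h : (2:Int) ^ (k + 1) ≤ m) :
    iterCount k m + k + 1 = PySem.Int.bitLength m := by
  revert h
  fun_induction iterCount k m with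
  | case1 k hlt =>
    intro h
    have hm0 : (0:Int) < m := by
      have : (0:Int) < 2 ^ (k+1) := by positivity
      omega
    have hcast : (m.natAbs : Int) = m := Int.natAbs_of_nonneg hm0.le
    have hlo : 2 ^ (k + 1) ≤ m.natAbs := by
      have : ((2:Int)) ^ (k+1) ≤ (m.natAbs : Int) := by rw [hcast]; exact h
      exact_mod_cast this
    have hhi : m.natAbs < 2 ^ (k + 2) := by
      have : (m.natAbs : Int) < (2:Int) ^ (k+2) := by rw [hcast]; exact hlt
      exact_mod_cast this
    have hne : m ≠ 0 := by omega
    have hb1 : m.natAbs < 2 ^ PySem.Int.bitLength m := PySem.Int.lt_two_pow_bitLength m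
    have hb2 : 2 ^ (PySem.Int.bitLength m - 1) ≤ m.natAbs := PySem.Int.two_pow_bitLength_le m hne
    have e1 : k + 1 < PySem.Int.bitLength m := by
      have := lt_of_le_of_lt hlo hb1
      exact (Nat.pow_lt_pow_iff_right (by norm_num : 1 < 2)).mp this
    have e2 : PySem.Int.bitLength m - 1 < k + 2 := by
      have := lt_of_le_of_lt hb2 hhi
      exact (Nat.pow_lt_pow_iff_right (by norm_num : 1 < 2)).mp this
    omega
  | case2 k hge ih =>
    intro h
    have h2 : (2:Int) ^ (k+2) = 2 * 2 ^ (k+1) := by ring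
    have hp : (0:Int) < 2 ^ (k+1) := by positivity
    have := ih (by omega)
    omega

-- ===== VERDICT (by name: the statement is the Claim_ definition above) =====
theorem generate_subtree_colors_spec : Claim_equal_generate_subtree_colors := by
  intro n _
  unfold Spec_generate_subtree_colors generate_subtree_colors generate_subtree_colors_alt
  rw [loopA_eq_buildB]
  have hm : n + 2 ^ 0 = n + 1 := by ring
  rw [hm, List.nil_append]
  congr 1
  by_cases hn : n < 3
  · rw [if_pos hn]
    unfold iterCount
    rw [if_pos (by omega : n + 1 < 2 ^ (0 + 2))]
  · rw [if_neg hn]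
    have := iterCount_bitLength 0 (n + 1) (by push_cast; omega)
    omega
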